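-- pv_equiv track=rewrite | github.com/daniel-reich/turbo-robot | Qqd2symFeFe4y5YGG_19.py | palindromic_date
-- ===== SOURCE A (Python) =====
-- def palindromic_date(date):
--     data1 = date.replace("/","")
--     data2= data1[2:4]+data1[:2]+data1[4:]
--     i = 0
--     j = len(data1)-1
--     while i <=j:
--         if data1[i]!=data1[j] or data2[i]!=data2[j]:
--             return False
--         i+=1
--         j-=1
--     return True
-- ===== SOURCE B (Python) =====
-- def palindromic_date(date):
--     data1 = date.replace("/", "")
--     data2 = data1[2:4] + data1[:2] + data1[4:]
--     return data1 == data1[::-1] and data2 == data2[::-1]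
-- ===== Notes on version B (the rewrite author's own statement) =====
-- stated objective: simpler
-- what changed: Replaces the convergent two-pointer index walk that checks both strings position-by-position with two whole-string reversed-equality tests (data == data[::-1]) combined by a boolean and.
import Mathlib
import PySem

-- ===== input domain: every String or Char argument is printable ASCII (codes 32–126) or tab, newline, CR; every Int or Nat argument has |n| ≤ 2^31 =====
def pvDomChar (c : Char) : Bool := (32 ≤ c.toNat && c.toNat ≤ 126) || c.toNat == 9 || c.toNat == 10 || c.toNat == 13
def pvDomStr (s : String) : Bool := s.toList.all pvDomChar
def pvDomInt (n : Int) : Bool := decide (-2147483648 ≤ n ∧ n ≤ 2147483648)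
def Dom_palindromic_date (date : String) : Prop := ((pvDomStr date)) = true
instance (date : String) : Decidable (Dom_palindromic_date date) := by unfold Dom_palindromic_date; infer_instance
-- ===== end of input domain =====

-- B replaces A's convergent two-pointer position-by-position walk over both strings with two
-- whole-string reversed-equality palindrome tests combined by `and` (objective: simpler).


-- ===== PORT A =====
-- A's while loop: i walks up, j walks down, comparing data1[i] with data1[j] and data2[i] with
-- data2[j].  Indexing is PySem.List.pyGet? (Option); at every reachable call 0 ≤ i ≤ j < length,
-- so the options are always `some` exactly as Python's indexing never raises here.
def pvLoopA (l1 l2 : List Char) (i j : Int) : Bool :=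
  if i ≤ j then
    if PySem.List.pyGet? l1 i != PySem.List.pyGet? l1 j
        || PySem.List.pyGet? l2 i != PySem.List.pyGet? l2 j then false
    else pvLoopA l1 l2 (i + 1) (j - 1)
  else true
termination_by (j + 1 - i).toNat
decreasing_by omega

def palindromic_date (date : String) : Bool :=
  let data1 := (PySem.Str.replace date "/" "").toList
  let data2 := PySem.List.slice data1 (some 2) (some 4)
      ++ PySem.List.slice data1 none (some 2) ++ PySem.List.slice data1 (some 4) none
  pvLoopA data1 data2 0 ((data1.length : Int) - 1)

-- ===== PORT B =====
-- data[::-1] is ported as List.reverse (PySem.List.slice?_none_none_neg_one).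
def palindromic_date_alt (date : String) : Bool :=
  let data1 := (PySem.Str.replace date "/" "").toList
  let data2 := PySem.List.slice data1 (some 2) (some 4)
      ++ PySem.List.slice data1 none (some 2) ++ PySem.List.slice data1 (some 4) none
  (data1 == data1.reverse) && (data2 == data2.reverse)

-- ===== PRECONDITION & SPEC =====
def Spec_palindromic_date (date : String) (out : Bool) : Prop := out = palindromic_date_alt date
instance (date : String) (out : Bool) : Decidable (Spec_palindromic_date date out) := by unfold Spec_palindromic_date; infer_instance

-- ===== CLAIM (what is proved, stated in full; the proofs are below) =====
def Claim_equal_palindromic_date : Prop := ∀ (date : String), Dom_palindromic_date date → Spec_palindromic_date date (palindromic_date date)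

-- ===== LEMMAS AND PROOFS =====

-- A's loop succeeds iff every index pair (k, i+j-k) inside [i, j] matches in both lists.
lemma pvLoopA_true_iff (l1 l2 : List Char) (i j : Int) :
    pvLoopA l1 l2 i j = true ↔
      ∀ k : Int, i ≤ k → k ≤ j →
        PySem.List.pyGet? l1 k = PySem.List.pyGet? l1 (i + j - k) ∧
        PySem.List.pyGet? l2 k = PySem.List.pyGet? l2 (i + j - k) := by
  fun_induction pvLoopA l1 l2 i j with
  | case1 i j hij hne =>
    simp only [Bool.or_eq_true, bne_iff_ne, ne_eq] at hne
    simp only [Bool.false_eq_true, false_iff, not_forall]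
    exact ⟨i, le_refl i, hij, by
      intro hc
      rw [show i + j - i = j by ring] at hc
      tauto⟩
  | case2 i j hij hne ih =>
    rw [ih]
    simp only [Bool.or_eq_true, bne_iff_ne, ne_eq, not_or, not_not] at hne
    constructor
    · intro h k hik hkj
      rcases lt_or_ge k (i + 1) with hk | hk
      · have hki : k = i := by omega
        rw [hki, show i + j - i = j from by ring]
        exact ⟨hne.1, hne.2⟩
      · rcases lt_or_ge (j - 1) k with hk2 | hk2
        · have hkj' : k = j := by omega
          rw [hkj', show i + j - j = i from by ring]
          exact ⟨hne.1.symm, hne.2.symm⟩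
        · have := h k hk hk2
          have heq : i + 1 + (j - 1) - k = i + j - k := by omega
          rwa [heq] at this
    · intro h k hik hkj
      have heq : i + 1 + (j - 1) - k = i + j - k := by omega
      rw [heq]
      exact h k (by omega) (by omega)
  | case3 i j hij =>
    simp only [true_iff]
    intro k hik hkj
    omega

-- l == l.reverse iff every pyGet? pair (k, n-1-k) with 0 ≤ k ≤ n-1 matches.
lemma beq_reverse_iff (l : List Char) :
    (l == l.reverse) = true ↔
      ∀ k : Int, 0 ≤ k → k ≤ (l.length : Int) - 1 →
        PySem.List.pyGet? l k = PySem.List.pyGet? l ((l.length : Int) - 1 - k) := by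
  rw [beq_iff_eq]
  constructor
  · intro h k hk0 hk1
    obtain ⟨m, rfl⟩ : ∃ m : Nat, k = (m : Int) := ⟨k.toNat, by omega⟩
    have hm : m < l.length := by omega
    have hk' : (l.length : Int) - 1 - (m : Int) = ((l.length - 1 - m : Nat) : Int) := by omega
    rw [hk', PySem.List.pyGet?_natCast, PySem.List.pyGet?_natCast]
    calc l[m]? = l.reverse[m]? := by rw [← h]
      _ = l[l.length - 1 - m]? := List.getElem?_reverse hm
  · intro h
    apply List.ext_getElem?
    intro m
    rcases lt_or_ge m l.length with hm | hm
    · have := h m (by omega) (by omega)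
      rw [PySem.List.pyGet?_natCast] at this
      have hk' : (l.length : Int) - 1 - (m : Int) = ((l.length - 1 - m : Nat) : Int) := by omega
      rw [hk', PySem.List.pyGet?_natCast] at this
      rw [this, List.getElem?_reverse hm]
    · rw [List.getElem?_eq_none (by omega), List.getElem?_eq_none (by simpa using hm)]

-- data2 is a rearrangement of data1, so it has the same length.
lemma pvLen2 (l : List Char) :
    (PySem.List.slice l (some 2) (some 4) ++ PySem.List.slice l none (some 2)
      ++ PySem.List.slice l (some 4) none).length = l.length := by
  rw [PySem.List.slice_toNat l (by norm_num) (by norm_num), PySem.List.slice_to l (by norm_num),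
    PySem.List.slice_from l (by norm_num)]
  simp only [List.length_append, List.length_take, List.length_drop]
  omega

-- ===== VERDICT (by name: the statement is the Claim_ definition above) =====
theorem palindromic_date_spec : Claim_equal_palindromic_date := by
  intro date _
  unfold Spec_palindromic_date palindromic_date palindromic_date_alt
  set l1 := (PySem.Str.replace date "/" "").toList with hl1
  set l2 := PySem.List.slice l1 (some 2) (some 4)
      ++ PySem.List.slice l1 none (some 2) ++ PySem.List.slice l1 (some 4) none with hl2
  have hlen : l2.length = l1.length := pvLen2 l1
  rw [Bool.eq_iff_iff, pvLoopA_true_iff, Bool.and_eq_true, beq_reverse_iff, beq_reverse_iff, hlen]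
  constructor
  · intro h
    constructor
    · intro k hk0 hk1
      have := (h k hk0 (by omega)).1
      rwa [show (0 : Int) + ((l1.length : Int) - 1) - k = (l1.length : Int) - 1 - k by ring] at this
    · intro k hk0 hk1
      have := (h k hk0 (by omega)).2
      rwa [show (0 : Int) + ((l1.length : Int) - 1) - k = (l1.length : Int) - 1 - k by ring] at this
  · intro h k hk0 hk1
    rw [show (0 : Int) + ((l1.length : Int) - 1) - k = (l1.length : Int) - 1 - k by ring]
    exact ⟨h.1 k hk0 (by omega), h.2 k hk0 (by omega)⟩
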